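-- pv_equiv track=rewrite | github.com/thieunv96/GenderAge-Data-Collection | tracking/pytracker/opfunc.py | get_k_previous_obsers
-- ===== SOURCE A (Python) =====
-- def get_k_previous_obsers(obsers, current_age, k):
--     """ Get the k-th previous observations from current frame.
--     Args:
--         obsers (dict): A dictionary. Key is an frame_id, and value is a pose at this frame.
--         current_age (int): A current frame_id
--         k (int): The order of the frame, whose pose want to get.
--     Returns:
--         the k-th previous observation from current.
--         Otherwise, the latest observation.
--     """
--     if len(obsers) == 0:
--         return [-1, -1, -1, -1]
--
--     for i in range(0, k):
--         dt = k - i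
--         if (current_age - dt) in obsers:
--             return obsers[current_age - dt]
--
--     max_age = max(obsers.keys())
--     return obsers[max_age]
-- ===== SOURCE B (Python) =====
-- def get_k_previous_obsers(obsers, current_age, k):
--     """Single pass with two accumulators instead of ordered key probing:
--     track (a) the item with the largest age and (b) the item with the
--     smallest age inside the window [current_age-k, current_age-1]; return
--     the windowed one if any, else the latest, else the sentinel."""
--     max_item = None
--     best_item = None
--     for age, pose in obsers.items():
--         if max_item is None or max_item[0] < age:
--             max_item = (age, pose)
--         if current_age - k <= age <= current_age - 1:
--             if best_item is None or age < best_item[0]: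
--                 best_item = (age, pose)
--     if max_item is None:
--         return [-1, -1, -1, -1]
--     if best_item is not None:
--         return best_item[1]
--     return max_item[1]
-- ===== Notes on version B (the rewrite author's own statement) =====
-- stated objective: alternative
-- what changed: Replaces A's ordered probe of k candidate keys (dt=k..1 membership tests with early return, plus a separate max() pass for the fallback) by one pass over the dict's items with two accumulators: the item with the largest age and the item with the smallest age inside the window [current_age-k, current_age-1]; the windowed minimum is returned if present, else the latest.
import Mathlib
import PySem

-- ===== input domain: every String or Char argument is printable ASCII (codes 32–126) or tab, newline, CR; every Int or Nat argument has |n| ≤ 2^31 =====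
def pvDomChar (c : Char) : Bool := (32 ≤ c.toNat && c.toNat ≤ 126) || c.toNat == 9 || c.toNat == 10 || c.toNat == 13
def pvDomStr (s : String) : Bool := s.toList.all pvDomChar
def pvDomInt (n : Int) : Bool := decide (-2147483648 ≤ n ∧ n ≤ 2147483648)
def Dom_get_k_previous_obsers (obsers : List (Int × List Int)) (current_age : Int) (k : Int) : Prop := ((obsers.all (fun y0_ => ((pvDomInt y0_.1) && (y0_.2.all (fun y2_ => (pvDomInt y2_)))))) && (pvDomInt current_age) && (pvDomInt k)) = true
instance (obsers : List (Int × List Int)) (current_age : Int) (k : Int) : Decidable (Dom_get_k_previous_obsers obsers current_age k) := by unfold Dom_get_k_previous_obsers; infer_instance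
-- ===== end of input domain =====

-- B replaces A's ordered probe of k candidate keys by ONE pass over the items with two
-- accumulators (latest item, minimal item inside the window); return values proved equal.

-- ===== PORT A =====
def get_k_previous_obsers (obsers : List (Int × List Int)) (current_age : Int) (k : Int) : List Int :=
  let d := PySem.Dict.ofList obsers
  if d.size = 0 then [-1, -1, -1, -1]
  else
    -- for i in range(0, k): dt = k - i; if (current_age - dt) in obsers: return obsers[current_age - dt]
    match (PySem.List.pyRange 0 k 1).findSome? (fun i =>
        if d.contains (current_age - (k - i)) then d.get? (current_age - (k - i)) else none) with
    | some v => v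
    -- max_age = max(obsers.keys()); return obsers[max_age]  (key present, so the getD default is never used)
    | none => d.getD ((PySem.List.max? d.keys (fun x => x)).getD 0) []

-- ===== PORT B =====
-- 'if max_item is None or max_item[0] < age: max_item = (age, pose)'
def pvUpdMax (mo : Option (Int × List Int)) (p : Int × List Int) : Option (Int × List Int) :=
  match mo with
  | none => some p
  | some q => if q.1 < p.1 then some p else some q

-- 'if lo <= age <= hi: if best_item is None or age < best_item[0]: best_item = (age, pose)'
def pvUpdBest (current_age k : Int) (bo : Option (Int × List Int)) (p : Int × List Int) : Option (Int × List Int) :=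
  if current_age - k ≤ p.1 ∧ p.1 ≤ current_age - 1 then
    match bo with
    | none => some p
    | some q => if p.1 < q.1 then some p else some q
  else bo

def get_k_previous_obsers_alt (obsers : List (Int × List Int)) (current_age : Int) (k : Int) : List Int :=
  let st := (PySem.Dict.ofList obsers).items.foldl
    (fun st p => (pvUpdMax st.1 p, pvUpdBest current_age k st.2 p))
    ((none, none) : Option (Int × List Int) × Option (Int × List Int))
  match st.1 with
  | none => [-1, -1, -1, -1]
  | some mq =>
    match st.2 with
    | some bq => bq.2
    | none => mq.2

-- ===== PRECONDITION & SPEC =====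
def Spec_get_k_previous_obsers (obsers : List (Int × List Int)) (current_age : Int) (k : Int) (out : List Int) : Prop := out = get_k_previous_obsers_alt obsers current_age k
instance (obsers : List (Int × List Int)) (current_age : Int) (k : Int) (out : List Int) : Decidable (Spec_get_k_previous_obsers obsers current_age k out) := by unfold Spec_get_k_previous_obsers; infer_instance

-- ===== CLAIM (what is proved, stated in full; the proofs are below) =====
def Claim_equal_get_k_previous_obsers : Prop := ∀ (obsers : List (Int × List Int)) (current_age : Int) (k : Int), Dom_get_k_previous_obsers obsers current_age k → Spec_get_k_previous_obsers obsers current_age k (get_k_previous_obsers obsers current_age k)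

-- ===== LEMMAS AND PROOFS =====

-- Core invariant for A: probing the ages a, a+1, …, a+n-1 in ascending order and returning the
-- first value present in the dict equals looking up the minimal key inside [a, a+n-1].
theorem pv_core (d : PySem.Dict Int (List Int)) :
    ∀ (n : Nat) (a : Int),
      (List.range n).findSome? (fun (i : Nat) => d.get? (a + (i : Int))) =
      (PySem.List.min? (d.keys.filter (fun x => decide (a ≤ x) && decide (x ≤ a + (n : Int) - 1))) (fun x => x)).map
        (fun m => d.getD m []) := by
  intro n
  induction n with
  | zero =>
    intro a
    have hf : d.keys.filter (fun x => decide (a ≤ x) && decide (x ≤ a + ((0:Nat) : Int) - 1)) = [] := by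
      apply List.filter_eq_nil_iff.mpr
      intro x _
      simp only [Bool.and_eq_true, decide_eq_true_eq, not_and]
      intro h1; push_cast; omega
    rw [hf]
    simp [PySem.List.min?]
  | succ n ih =>
    intro a
    cases hga : d.get? a with
    | some v =>
      simp only [List.range_succ_eq_map, List.findSome?_cons, Nat.cast_zero, add_zero, hga]
      have hmem : a ∈ d.keys := by
        by_contra hc
        rw [← PySem.Dict.get?_eq_none_iff_not_mem_keys] at hc
        simp [hc] at hga
      have hcand : a ∈ d.keys.filter (fun x => decide (a ≤ x) && decide (x ≤ a + ((n+1:Nat):Int) - 1)) := by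
        rw [List.mem_filter]
        refine ⟨hmem, ?_⟩
        simp only [Bool.and_eq_true, decide_eq_true_eq]
        refine ⟨le_refl a, by push_cast; omega⟩
      cases hmin : PySem.List.min? (d.keys.filter (fun x => decide (a ≤ x) && decide (x ≤ a + ((n+1:Nat):Int) - 1))) (fun x => x) with
      | none =>
        rw [PySem.List.min?_eq_none_iff] at hmin
        rw [hmin] at hcand; simp at hcand
      | some m =>
        have hle : m ≤ a := PySem.List.min?_isMin hmin a hcand
        have hge : a ≤ m := by
          have hm1 := PySem.List.min?_mem hmin
          rw [List.mem_filter] at hm1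
          have := hm1.2
          simp only [Bool.and_eq_true, decide_eq_true_eq] at this
          exact this.1
        have hma : m = a := le_antisymm hle hge
        rw [hma]
        simp only [Option.map_some]
        rw [PySem.Dict.getD_eq_get?_getD, hga]
        rfl
    | none =>
      simp only [List.range_succ_eq_map, List.findSome?_cons, Nat.cast_zero, add_zero, hga]
      have hnotmem : a ∉ d.keys := by
        rw [← PySem.Dict.get?_eq_none_iff_not_mem_keys]; exact hga
      rw [List.findSome?_map]
      have hshift : ((fun (i:Nat) => d.get? (a + (i:Int))) ∘ Nat.succ) =
          (fun (i:Nat) => d.get? ((a+1) + (i:Int))) := by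
        funext i
        simp only [Function.comp]
        congr 1
        push_cast; ring
      rw [hshift, ih (a+1)]
      have hfe : d.keys.filter (fun x => decide (a+1 ≤ x) && decide (x ≤ (a+1) + (n:Int) - 1)) =
          d.keys.filter (fun x => decide (a ≤ x) && decide (x ≤ a + ((n+1:Nat):Int) - 1)) := by
        apply List.filter_congr
        intro x hx
        have hne : x ≠ a := fun h => hnotmem (h ▸ hx)
        rw [← Bool.decide_and, ← Bool.decide_and, decide_eq_decide]
        constructor <;> (intro h; push_cast at *; omega)
      rw [hfe]

-- A's probe loop as the minimal window key looked up in the dict.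
theorem pv_key (d : PySem.Dict Int (List Int)) (ca k : Int) :
    (PySem.List.pyRange 0 k 1).findSome? (fun i =>
        if d.contains (ca - (k - i)) then d.get? (ca - (k - i)) else none) =
    (PySem.List.min? (d.keys.filter (fun age => decide (ca - k ≤ age) && decide (age ≤ ca - 1))) (fun x => x)).map
      (fun m => d.getD m []) := by
  rw [PySem.List.pyRange_one, List.findSome?_map]
  have hfun : ((fun (i : Int) => if d.contains (ca - (k - i)) then d.get? (ca - (k - i)) else none)
      ∘ (fun (j : Nat) => (0:Int) + (j : Int))) = fun (j : Nat) => d.get? ((ca - k) + (j : Int)) := by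
    funext j
    simp only [Function.comp]
    have harg : ca - (k - ((0:Int) + (j : Int))) = (ca - k) + (j : Int) := by ring
    rw [harg]
    cases h : d.get? ((ca - k) + (j : Int)) with
    | some v =>
      have hc : d.contains ((ca - k) + (j : Int)) = true := by
        rw [PySem.Dict.contains_eq_isSome_get?, h]; rfl
      simp [hc]
    | none =>
      have hc : d.contains ((ca - k) + (j : Int)) = false := by
        rw [PySem.Dict.contains_eq_isSome_get?, h]; rfl
      simp [hc]
  rw [hfun, pv_core d ((k - 0).toNat) (ca - k)]
  have hfe : d.keys.filter (fun x => decide (ca - k ≤ x) && decide (x ≤ (ca - k) + (((k - 0).toNat : Nat) : Int) - 1)) =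
      d.keys.filter (fun age => decide (ca - k ≤ age) && decide (age ≤ ca - 1)) := by
    apply List.filter_congr
    intro x _
    rw [← Bool.decide_and, ← Bool.decide_and, decide_eq_decide]
    constructor <;> (intro h; omega)
  rw [hfe]

-- B's paired fold splits into two independent folds.
theorem pv_fold_split (ca k : Int) :
    ∀ (l : List (Int × List Int)) (mo bo : Option (Int × List Int)),
      l.foldl (fun st p => (pvUpdMax st.1 p, pvUpdBest ca k st.2 p)) (mo, bo) =
      (l.foldl pvUpdMax mo, l.foldl (pvUpdBest ca k) bo) := by
  intro l
  induction l with
  | nil => intro mo bo; rfl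
  | cons p t ih => intro mo bo; simpa using ih (pvUpdMax mo p) (pvUpdBest ca k bo p)

-- The max fold from a some-state returns an element of acc :: l with the maximal key
-- (first occurrence on ties).
theorem pv_maxfold (l : List (Int × List Int)) :
    ∀ (a : Int × List Int), ∃ r, l.foldl pvUpdMax (some a) = some r ∧ r ∈ a :: l ∧
      ∀ p ∈ a :: l, p.1 ≤ r.1 := by
  induction l with
  | nil =>
    intro a
    exact ⟨a, rfl, .head _, by intro p hp; cases hp with
      | head => exact le_refl _
      | tail _ h => cases h⟩
  | cons q t ih =>
    intro a
    by_cases h : a.1 < q.1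
    · obtain ⟨r, h1, h2, h3⟩ := ih q
      refine ⟨r, ?_, ?_, ?_⟩
      · simp only [List.foldl_cons, pvUpdMax, if_pos h]; exact h1
      · cases h2 with
        | head => exact .tail _ (.head _)
        | tail _ hm => exact .tail _ (.tail _ hm)
      · intro p hp
        cases hp with
        | head => exact le_trans (le_of_lt h) (h3 q (.head _))
        | tail _ hm => exact h3 p hm
    · obtain ⟨r, h1, h2, h3⟩ := ih a
      refine ⟨r, ?_, ?_, ?_⟩
      · simp only [List.foldl_cons, pvUpdMax, if_neg h]; exact h1
      · cases h2 with
        | head => exact .head _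
        | tail _ hm => exact .tail _ (.tail _ hm)
      · intro p hp
        cases hp with
        | head => exact h3 a (.head _)
        | tail _ hm =>
          cases hm with
          | head => exact le_trans (le_of_not_gt h) (h3 a (.head _))
          | tail _ hm2 => exact h3 p (.tail _ hm2)

-- The best fold: characterisation of the result (none ↔ no key in the window;
-- some r → r is a windowed element with the minimal key, first occurrence on ties).
theorem pv_bestfold (ca k : Int) (l : List (Int × List Int)) :
    ∀ (bo : Option (Int × List Int)),
      (∀ q, bo = some q → ca - k ≤ q.1 ∧ q.1 ≤ ca - 1) →
      (l.foldl (pvUpdBest ca k) bo = none →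
        bo = none ∧ ∀ p ∈ l, ¬(ca - k ≤ p.1 ∧ p.1 ≤ ca - 1)) ∧
      (∀ r, l.foldl (pvUpdBest ca k) bo = some r →
        (bo = some r ∨ r ∈ l) ∧ (ca - k ≤ r.1 ∧ r.1 ≤ ca - 1) ∧
        (∀ q, bo = some q → r.1 ≤ q.1) ∧
        ∀ p ∈ l, (ca - k ≤ p.1 ∧ p.1 ≤ ca - 1) → r.1 ≤ p.1) := by
  induction l with
  | nil =>
    intro bo hbo
    constructor
    · intro h; simp only [List.foldl_nil] at h; exact ⟨h, by intro p hp; cases hp⟩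
    · intro r h
      simp only [List.foldl_nil] at h
      refine ⟨Or.inl h, hbo r h, ?_, by intro p hp; cases hp⟩
      intro q hq; rw [h] at hq; cases hq; exact le_refl _
  | cons p t ih =>
    intro bo hbo
    by_cases hw : ca - k ≤ p.1 ∧ p.1 ≤ ca - 1
    · -- p is in the window: the accumulator becomes some (p or better)
      cases hbo' : bo with
      | none =>
        subst hbo'
        have hstep : (p :: t).foldl (pvUpdBest ca k) none = t.foldl (pvUpdBest ca k) (some p) := by
          simp only [List.foldl_cons, pvUpdBest, if_pos hw]
        obtain ⟨ihn, ihs⟩ := ih (some p) (by intro q hq; cases hq; exact hw)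
        constructor
        · intro h
          rw [hstep] at h
          exact absurd (ihn h).1 (by simp)
        · intro r h
          rw [hstep] at h
          obtain ⟨hmem, hwin, hacc, hmin⟩ := ihs r h
          refine ⟨?_, hwin, ?_, ?_⟩
          · cases hmem with
            | inl he => exact Or.inr (by cases he; exact .head _)
            | inr hm => exact Or.inr (.tail _ hm)
          · intro q hq; cases hq
          · intro x hx hxw
            cases hx with
            | head => exact hacc p rfl
            | tail _ hm => exact hmin x hm hxw
      | some q =>
        subst hbo'
        by_cases hlt : p.1 < q.1
        · have hstep : (p :: t).foldl (pvUpdBest ca k) (some q) = t.foldl (pvUpdBest ca k) (some p) := by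
            simp only [List.foldl_cons, pvUpdBest, if_pos hw, if_pos hlt]
          obtain ⟨ihn, ihs⟩ := ih (some p) (by intro x hx; cases hx; exact hw)
          constructor
          · intro h
            rw [hstep] at h
            exact absurd (ihn h).1 (by simp)
          · intro r h
            rw [hstep] at h
            obtain ⟨hmem, hwin, hacc, hmin⟩ := ihs r h
            refine ⟨?_, hwin, ?_, ?_⟩
            · cases hmem with
              | inl he => exact Or.inr (by cases he; exact .head _)
              | inr hm => exact Or.inr (.tail _ hm)
            · intro x hx; cases hx
              exact le_trans (hacc p rfl) (le_of_lt hlt)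
            · intro x hx hxw
              cases hx with
              | head => exact hacc p rfl
              | tail _ hm => exact hmin x hm hxw
        · have hstep : (p :: t).foldl (pvUpdBest ca k) (some q) = t.foldl (pvUpdBest ca k) (some q) := by
            simp only [List.foldl_cons, pvUpdBest, if_pos hw, if_neg hlt]
          obtain ⟨ihn, ihs⟩ := ih (some q) (by intro x hx; cases hx; exact hbo q rfl)
          constructor
          · intro h
            rw [hstep] at h
            exact absurd (ihn h).1 (by simp)
          · intro r h
            rw [hstep] at h
            obtain ⟨hmem, hwin, hacc, hmin⟩ := ihs r h
            refine ⟨?_, hwin, ?_, ?_⟩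
            · cases hmem with
              | inl he => exact Or.inl he
              | inr hm => exact Or.inr (.tail _ hm)
            · intro x hx; cases hx
              exact hacc q rfl
            · intro x hx hxw
              cases hx with
              | head => exact le_trans (hacc q rfl) (le_of_not_gt hlt)
              | tail _ hm => exact hmin x hm hxw
    · -- p outside the window: the accumulator is unchanged
      have hstep : (p :: t).foldl (pvUpdBest ca k) bo = t.foldl (pvUpdBest ca k) bo := by
        simp only [List.foldl_cons, pvUpdBest, if_neg hw]
      obtain ⟨ihn, ihs⟩ := ih bo hbo
      constructor
      · intro h
        rw [hstep] at h
        obtain ⟨h1, h2⟩ := ihn h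
        refine ⟨h1, ?_⟩
        intro x hx
        cases hx with
        | head => exact hw
        | tail _ hm => exact h2 x hm
      · intro r h
        rw [hstep] at h
        obtain ⟨hmem, hwin, hacc, hmin⟩ := ihs r h
        refine ⟨?_, hwin, hacc, ?_⟩
        · cases hmem with
          | inl he => exact Or.inl he
          | inr hm => exact Or.inr (.tail _ hm)
        · intro x hx hxw
          cases hx with
          | head => exact absurd hxw hw
          | tail _ hm => exact hmin x hm hxw

theorem get_k_previous_obsers_eq (obsers : List (Int × List Int)) (ca k : Int) :
    get_k_previous_obsers obsers ca k = get_k_previous_obsers_alt obsers ca k := by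
  unfold get_k_previous_obsers get_k_previous_obsers_alt
  simp only
  set d := PySem.Dict.ofList obsers with hd
  have hnd : d.keys.Nodup := PySem.Dict.nodup_keys_ofList obsers
  rw [pv_fold_split]
  cases hitems : d.items with
  | nil =>
    have hsz : d.size = 0 := by simp [PySem.Dict.size, hitems]
    simp [hsz]
  | cons p0 rest =>
    have hsz : d.size ≠ 0 := by simp [PySem.Dict.size, hitems]
    simp only [hsz, if_false]
    rw [pv_key]
    -- max fold result
    obtain ⟨mr, hmr, hmrMem, hmrMax⟩ := pv_maxfold rest p0
    have hmrItems : mr ∈ d.items := hitems ▸ hmrMem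
    have hfold : (p0 :: rest).foldl pvUpdMax none = some mr := by
      simpa [pvUpdMax] using hmr
    rw [hfold]
    have hmaxAll : ∀ p ∈ d.items, p.1 ≤ mr.1 := by
      intro p hp; exact hmrMax p (hitems ▸ hp)
    -- best fold characterisation
    obtain ⟨hbn, hbs⟩ := pv_bestfold ca k (p0 :: rest) none (by intro q hq; cases hq)
    cases hbf : (p0 :: rest).foldl (pvUpdBest ca k) none with
    | none =>
      -- no windowed key: A's filter is empty, both return the latest value
      obtain ⟨-, hnone⟩ := hbn hbf
      have hfilt : d.keys.filter (fun age => decide (ca - k ≤ age) && decide (age ≤ ca - 1)) = [] := by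
        apply List.filter_eq_nil_iff.mpr
        intro x hx
        simp only [Bool.and_eq_true, decide_eq_true_eq, not_and]
        intro h1 h2
        have hxi : x ∈ d.items.map Prod.fst := hx
        obtain ⟨p, hp, hpx⟩ := List.mem_map.mp hxi
        exact hnone p (hitems ▸ hp) (by rw [hpx]; exact ⟨h1, h2⟩)
      rw [hfilt]
      simp only [PySem.List.min?]
      -- A's max over keys equals mr.1
      have hkey : mr.1 ∈ d.keys := PySem.Dict.mem_keys_of_mem_items d hmrItems
      cases hmx : PySem.List.max? d.keys (fun x => x) with
      | none =>
        rw [PySem.List.max?_eq_none_iff] at hmx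
        rw [hmx] at hkey; cases hkey
      | some M =>
        have hM1 : mr.1 ≤ M := PySem.List.max?_isMax hmx mr.1 hkey
        have hM2 : M ≤ mr.1 := by
          have hMk := PySem.List.max?_mem hmx
          obtain ⟨p, hp, hpx⟩ := List.mem_map.mp hMk
          exact hpx ▸ hmaxAll p hp
        have hMe : M = mr.1 := le_antisymm hM2 hM1
        rw [Option.getD_some, hMe,
          PySem.Dict.getD_of_mem_items d (by simpa using hmrItems) hnd]
        rfl
    | some br =>
      obtain ⟨hbrMem, hbrWin, -, hbrMin⟩ := hbs br hbf
      have hbrItems : br ∈ d.items := by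
        cases hbrMem with
        | inl he => cases he
        | inr hm => exact hitems ▸ hm
      -- A's filter contains br.1, so min? is some m with m = br.1
      have hbrKey : br.1 ∈ d.keys.filter (fun age => decide (ca - k ≤ age) && decide (age ≤ ca - 1)) := by
        rw [List.mem_filter]
        refine ⟨PySem.Dict.mem_keys_of_mem_items d hbrItems, ?_⟩
        simp only [Bool.and_eq_true, decide_eq_true_eq]
        exact hbrWin
      cases hmin : PySem.List.min? (d.keys.filter (fun age => decide (ca - k ≤ age) && decide (age ≤ ca - 1))) (fun x => x) with
      | none =>
        rw [PySem.List.min?_eq_none_iff] at hmin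
        rw [hmin] at hbrKey; cases hbrKey
      | some m =>
        have hle : m ≤ br.1 := PySem.List.min?_isMin hmin br.1 hbrKey
        have hge : br.1 ≤ m := by
          have hm1 := PySem.List.min?_mem hmin
          rw [List.mem_filter] at hm1
          obtain ⟨hmk, hmw⟩ := hm1
          simp only [Bool.and_eq_true, decide_eq_true_eq] at hmw
          obtain ⟨p, hp, hpx⟩ := List.mem_map.mp hmk
          exact hpx ▸ hbrMin p (hitems ▸ hp) (by rw [hpx]; exact hmw)
        have hme : m = br.1 := le_antisymm hle hge
        simp only [Option.map_some]
        rw [hme, PySem.Dict.getD_of_mem_items d (by simpa using hbrItems) hnd]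

-- ===== VERDICT (by name: the statement is the Claim_ definition above) =====
theorem get_k_previous_obsers_spec : Claim_equal_get_k_previous_obsers := by
  intro obsers ca k _
  exact get_k_previous_obsers_eq obsers ca k
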